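-- pv_equiv track=rewrite | github.com/tbrup/ctf-writeups | HackyEaster/he2023/level5/solve21.py | uniqe_at_pos
-- ===== SOURCE A (Python) =====
-- def get_pos(l, pos):
--     return l.split('_')[pos]
--
-- def uniqe_at_pos(lst, pos):
--     hist = {}
--     forbidden = set()
--     for l in lst:
--         l = l.split('_')
--         for i in range(pos):
--             forbidden.add(l[i])
--         l = l[pos]
--         if l in hist:
--             hist[l] += 1
--         else:
--             hist[l] = 1
--     s = {k for k, v in hist.items() if v == 1} - forbidden
--
--     return [l for l in lst if get_pos(l, pos) in s]
-- ===== SOURCE B (Python) =====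
-- def uniqe_at_pos(lst, pos):
--     groups = {}
--     forbidden = set()
--     for l in lst:
--         parts = l.split('_')
--         for i in range(pos):
--             forbidden.add(parts[i])
--         tok = parts[pos]
--         groups[tok] = groups.get(tok, []) + [l]
--     return [g[0] for tok, g in groups.items()
--             if len(g) == 1 and tok not in forbidden]
-- ===== Notes on version B (the rewrite author's own statement) =====
-- stated objective: alternative
-- what changed: B replaces A's count-dict + set-comprehension + second re-splitting filter pass over lst by a single grouping pass (token -> list of originals) and emits the stored string of each singleton, non-forbidden group directly from the dict, with no re-split and no second scan of lst.
import Mathlib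
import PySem

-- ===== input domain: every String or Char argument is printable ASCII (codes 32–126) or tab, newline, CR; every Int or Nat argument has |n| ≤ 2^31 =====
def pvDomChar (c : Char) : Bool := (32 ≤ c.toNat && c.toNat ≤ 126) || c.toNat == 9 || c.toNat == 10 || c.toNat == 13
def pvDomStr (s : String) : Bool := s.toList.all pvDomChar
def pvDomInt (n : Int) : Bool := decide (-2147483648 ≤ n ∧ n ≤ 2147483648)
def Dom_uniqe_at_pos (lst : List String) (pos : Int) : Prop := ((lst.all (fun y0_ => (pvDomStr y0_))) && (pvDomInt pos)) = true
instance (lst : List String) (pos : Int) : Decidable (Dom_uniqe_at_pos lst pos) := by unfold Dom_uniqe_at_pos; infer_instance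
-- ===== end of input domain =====

-- B replaces A's count-dict + second re-splitting filter pass by one grouping pass
-- (token -> list of original strings) and emits each singleton, non-forbidden group's
-- stored string straight from the dict (objective: alternative decomposition, same cost).

-- ===== PORT A =====
-- l.split('_'): separator "_" is non-empty, so PySem.Str.split? is always `some`
def get_pos (l : String) (pos : Int) : String :=
  PySem.List.pyGetD ((PySem.Str.split? l "_").getD []) pos ""

def uniqe_at_pos (lst : List String) (pos : Int) : List String :=
  let st := lst.foldl
    (fun (st : PySem.Dict String Int × PySem.Set String) l0 =>
      let l := (PySem.Str.split? l0 "_").getD []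
      let forbidden := (PySem.List.pyRange 0 pos 1).foldl
        (fun f i => PySem.Set.add f (PySem.List.pyGetD l i "")) st.2
      let t := PySem.List.pyGetD l pos ""
      -- 'hist[l] += 1' reads the present entry and stores it back; 'hist[l] = 1' inserts
      let hist := if st.1.contains t then st.1.insert t (st.1.getD t 0 + 1) else st.1.insert t 1
      (hist, forbidden))
    (PySem.Dict.empty, PySem.Set.empty)
  let s := PySem.Set.diff
    (PySem.Set.ofList ((st.1.items.filter (fun p => p.2 == (1 : Int))).map (fun p => p.1)))
    st.2
  lst.filter (fun l => PySem.Set.contains s (get_pos l pos))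

-- ===== PORT B =====
def uniqe_at_pos_alt (lst : List String) (pos : Int) : List String :=
  let st := lst.foldl
    (fun (st : PySem.Dict String (List String) × PySem.Set String) l =>
      let parts := (PySem.Str.split? l "_").getD []
      let forbidden := (PySem.List.pyRange 0 pos 1).foldl
        (fun f i => PySem.Set.add f (PySem.List.pyGetD parts i "")) st.2
      let t := PySem.List.pyGetD parts pos ""
      (st.1.modify t [] (· ++ [l]), forbidden))
    (PySem.Dict.empty, PySem.Set.empty)
  (st.1.items.filter (fun p => p.2.length == 1 && !(PySem.Set.contains st.2 p.1))).map
    (fun p => PySem.List.pyGetD p.2 0 "")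

-- ===== PRECONDITION & SPEC =====
-- Pre_: exactly the inputs where Python A returns normally (A raises IndexError when
-- some element's '_'-split is too short for index pos).
def Pre_uniqe_at_pos (lst : List String) (pos : Int) : Prop :=
  ∀ l ∈ lst, PySem.Raise.InRange ((PySem.Str.split? l "_").getD []).length pos
instance (lst : List String) (pos : Int) : Decidable (Pre_uniqe_at_pos lst pos) := by
  unfold Pre_uniqe_at_pos; infer_instance

def pvWitness_uniqe_at_pos : List String × Int := (["a_b", "c_b", "d_e"], 1)

def Spec_uniqe_at_pos (lst : List String) (pos : Int) (out : List String) : Prop :=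
  out = uniqe_at_pos_alt lst pos
instance (lst : List String) (pos : Int) (out : List String) : Decidable (Spec_uniqe_at_pos lst pos out) := by unfold Spec_uniqe_at_pos; infer_instance

-- ===== CLAIM (what is proved, stated in full; the proofs are below) =====
def Claim_equal_uniqe_at_pos : Prop := ∀ (lst : List String) (pos : Int), Dom_uniqe_at_pos lst pos → Pre_uniqe_at_pos lst pos → Spec_uniqe_at_pos lst pos (uniqe_at_pos lst pos)

-- ===== LEMMAS AND PROOFS =====

-- proof-side names for the pieces of the two folds
def pvForbStep (pos : Int) (f : PySem.Set String) (l0 : String) : PySem.Set String :=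
  (PySem.List.pyRange 0 pos 1).foldl
    (fun f i => PySem.Set.add f (PySem.List.pyGetD ((PySem.Str.split? l0 "_").getD []) i "")) f

def pvForb (lst : List String) (pos : Int) : PySem.Set String :=
  lst.foldl (pvForbStep pos) PySem.Set.empty

def pvHist (lst : List String) (pos : Int) : PySem.Dict String Int :=
  lst.foldl (fun d l0 =>
    if d.contains (get_pos l0 pos) then d.insert (get_pos l0 pos) (d.getD (get_pos l0 pos) 0 + 1)
    else d.insert (get_pos l0 pos) 1) PySem.Dict.empty

def pvGrp (lst : List String) (pos : Int) : PySem.Dict String (List String) :=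
  lst.foldl (fun d l => d.modify (get_pos l pos) [] (· ++ [l])) PySem.Dict.empty

theorem pv_A_fold (pos : Int) (lst : List String)
    (d : PySem.Dict String Int) (f0 : PySem.Set String) :
    lst.foldl
      (fun (st : PySem.Dict String Int × PySem.Set String) l0 =>
        let l := (PySem.Str.split? l0 "_").getD []
        let forbidden := (PySem.List.pyRange 0 pos 1).foldl
          (fun f i => PySem.Set.add f (PySem.List.pyGetD l i "")) st.2
        let t := PySem.List.pyGetD l pos ""
        let hist := if st.1.contains t then st.1.insert t (st.1.getD t 0 + 1) else st.1.insert t 1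
        (hist, forbidden)) (d, f0)
    = (lst.foldl (fun d l0 =>
        if d.contains (get_pos l0 pos) then d.insert (get_pos l0 pos) (d.getD (get_pos l0 pos) 0 + 1)
        else d.insert (get_pos l0 pos) 1) d,
       lst.foldl (pvForbStep pos) f0) := by
  induction lst generalizing d f0 with
  | nil => rfl
  | cons x xs ih =>
    simp only [List.foldl_cons]
    rw [ih]
    rfl

theorem pv_B_fold (pos : Int) (lst : List String)
    (d : PySem.Dict String (List String)) (f0 : PySem.Set String) :
    lst.foldl
      (fun (st : PySem.Dict String (List String) × PySem.Set String) l =>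
        let parts := (PySem.Str.split? l "_").getD []
        let forbidden := (PySem.List.pyRange 0 pos 1).foldl
          (fun f i => PySem.Set.add f (PySem.List.pyGetD parts i "")) st.2
        let t := PySem.List.pyGetD parts pos ""
        (st.1.modify t [] (· ++ [l]), forbidden)) (d, f0)
    = (lst.foldl (fun d l => d.modify (get_pos l pos) [] (· ++ [l])) d,
       lst.foldl (pvForbStep pos) f0) := by
  induction lst generalizing d f0 with
  | nil => rfl
  | cons x xs ih =>
    simp only [List.foldl_cons]
    rw [ih]
    rfl

theorem pv_A_eq (lst : List String) (pos : Int) :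
    uniqe_at_pos lst pos
    = lst.filter (fun l => PySem.Set.contains
        (PySem.Set.diff
          (PySem.Set.ofList (((pvHist lst pos).items.filter (fun p => p.2 == (1 : Int))).map (fun p => p.1)))
          (pvForb lst pos))
        (get_pos l pos)) := by
  unfold uniqe_at_pos pvHist pvForb
  rw [pv_A_fold]

theorem pv_B_eq (lst : List String) (pos : Int) :
    uniqe_at_pos_alt lst pos
    = ((pvGrp lst pos).items.filter
        (fun p => p.2.length == 1 && !(PySem.Set.contains (pvForb lst pos) p.1))).map
      (fun p => PySem.List.pyGetD p.2 0 "") := by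
  unfold uniqe_at_pos_alt pvGrp pvForb
  rw [pv_B_fold]

theorem pv_foldl_ext {α β : Type} (f g : α → β → α) (h : ∀ a b, f a b = g a b)
    (l : List β) : ∀ (a : α), l.foldl f a = l.foldl g a := by
  induction l with
  | nil => intro a; rfl
  | cons x xs ih => intro a; simp only [List.foldl_cons, h, ih]

theorem pv_hist_counter (lst : List String) (pos : Int) :
    pvHist lst pos = PySem.Dict.counter (lst.map (fun l => get_pos l pos)) := by
  unfold pvHist
  have hstep : ∀ (d : PySem.Dict String Int) (l0 : String),
      (if d.contains (get_pos l0 pos) then d.insert (get_pos l0 pos) (d.getD (get_pos l0 pos) 0 + 1)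
       else d.insert (get_pos l0 pos) 1)
      = d.insert (get_pos l0 pos) (d.getD (get_pos l0 pos) 0 + 1) := by
    intro d l0
    cases h : d.contains (get_pos l0 pos)
    · rw [if_neg (by simp), PySem.Dict.getD_of_not_contains d 0 h]
      norm_num
    · rw [if_pos (by simp)]
  rw [pv_foldl_ext _ _ hstep lst PySem.Dict.empty]
  rw [show List.foldl
        (fun (d : PySem.Dict String Int) l0 => d.insert (get_pos l0 pos) (d.getD (get_pos l0 pos) 0 + 1))
        PySem.Dict.empty lst
      = List.foldl (fun (d : PySem.Dict String Int) x => d.insert x (d.getD x 0 + 1))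
        PySem.Dict.empty (lst.map (fun l => get_pos l pos))
    from (List.foldl_map (f := fun l => get_pos l pos)
      (g := fun (d : PySem.Dict String Int) x => d.insert x (d.getD x 0 + 1))
      (l := lst) (init := PySem.Dict.empty)).symm]
  exact PySem.Dict.foldl_insert_getD_add_one_eq_counter _

theorem pv_grp_keys (lst : List String) (pos : Int) :
    (pvGrp lst pos).keys = PySem.Set.ofList (lst.map (fun l => get_pos l pos)) := by
  unfold pvGrp
  rw [PySem.Dict.keys_foldl_modify_key]
  simp [PySem.Dict.keys_empty, PySem.Set.update_nil_left]

theorem pv_grp_getD (lst : List String) (pos : Int) (k : String) :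
    (pvGrp lst pos).getD k [] = lst.filter (fun l => get_pos l pos == k) := by
  unfold pvGrp
  rw [show lst.foldl (fun d l => d.modify (get_pos l pos) [] (· ++ [l])) PySem.Dict.empty
      = (lst.map (fun l => (get_pos l pos, l))).foldl (fun d p => d.modify p.1 [] (· ++ [p.2])) PySem.Dict.empty
    from (List.foldl_map (f := fun l => (get_pos l pos, l))
      (g := fun (d : PySem.Dict String (List String)) (p : String × String) => d.modify p.1 [] (· ++ [p.2]))
      (l := lst) (init := PySem.Dict.empty)).symm]
  rw [PySem.Dict.getD_foldl_modify_append]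
  rw [List.filter_map, List.map_map]
  simp [Function.comp_def, PySem.Dict.getD_empty]

theorem pv_grp_items (lst : List String) (pos : Int) :
    (pvGrp lst pos).items
    = (PySem.Set.ofList (lst.map (fun l => get_pos l pos))).map
        (fun k => (k, lst.filter (fun l => get_pos l pos == k))) := by
  have hnd : (pvGrp lst pos).keys.Nodup := by
    rw [pv_grp_keys]; exact PySem.Set.nodup_ofList _
  rw [PySem.Dict.items_eq_map_keys (pvGrp lst pos) hnd []]
  rw [pv_grp_keys]
  exact List.map_congr_left (fun k _ => by rw [pv_grp_getD])

theorem pv_count_length (lst : List String) (g : String → String) (x : String) :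
    (lst.map g).count x = (lst.filter (fun l => g l == x)).length := by
  induction lst with
  | nil => rfl
  | cons a as ih =>
    by_cases h : g a == x
    · simp [List.count_cons, h, ih]
    · simp [List.count_cons, h, ih]

theorem pv_intbeq (n : Nat) : ((n : Int) == (1 : Int)) = (n == 1) := by
  by_cases h : n = 1
  · simp [h]
  · have h' : (n : Int) ≠ 1 := by exact_mod_cast h
    rw [show (n == 1) = false from beq_eq_false_iff_ne.mpr h,
        show ((n : Int) == 1) = false from beq_eq_false_iff_ne.mpr h']

theorem pv_contains_eq (s : PySem.Set String) (x : String) :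
    PySem.Set.contains s x = decide (x ∈ s) := by
  by_cases h : x ∈ s
  · rw [(PySem.Set.contains_iff s x).mpr h]
    simp [h]
  · cases hc : PySem.Set.contains s x
    · simp [h]
    · exact absurd ((PySem.Set.contains_iff s x).mp hc) h

theorem pv_contains_diff (S F : PySem.Set String) (x : String) :
    PySem.Set.contains (PySem.Set.diff S F) x = (decide (x ∈ S) && !(PySem.Set.contains F x)) := by
  rw [pv_contains_eq (PySem.Set.diff S F) x, pv_contains_eq F x]
  by_cases hS : x ∈ S <;> by_cases hF : x ∈ F <;>
    simp [PySem.Set.mem_diff, hS, hF]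

theorem pv_A_pred (lst : List String) (pos : Int) (x : String) :
    PySem.Set.contains
      (PySem.Set.diff
        (PySem.Set.ofList (((pvHist lst pos).items.filter (fun p => p.2 == (1 : Int))).map (fun p => p.1)))
        (pvForb lst pos)) x
    = (((lst.filter (fun l => get_pos l pos == x)).length == 1)
        && !(PySem.Set.contains (pvForb lst pos) x)) := by
  rw [pv_hist_counter, PySem.Dict.items_counter]
  rw [List.filter_map, List.map_map]
  have hK : ((PySem.Set.ofList (lst.map (fun l => get_pos l pos))).filter
        ((fun p => p.2 == (1 : Int)) ∘ (fun k => (k, ((lst.map (fun l => get_pos l pos)).count k : Int))))).map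
        ((fun p => p.1) ∘ (fun k => (k, ((lst.map (fun l => get_pos l pos)).count k : Int))))
      = (PySem.Set.ofList (lst.map (fun l => get_pos l pos))).filter
          (fun k => (lst.filter (fun l => get_pos l pos == k)).length == 1) := by
    have h1 : ((fun (p : String × Int) => p.1) ∘ (fun k => (k, ((lst.map (fun l => get_pos l pos)).count k : Int)))) = fun k => k := rfl
    rw [h1, List.map_id']
    apply List.filter_congr
    intro k _
    show ((((lst.map (fun l => get_pos l pos)).count k : Int)) == (1 : Int)) = _
    rw [pv_count_length lst (fun l => get_pos l pos) k, pv_intbeq]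
  rw [hK, pv_contains_diff]
  have hiff : x ∈ PySem.Set.ofList ((PySem.Set.ofList (lst.map (fun l => get_pos l pos))).filter
        (fun k => (lst.filter (fun l => get_pos l pos == k)).length == 1))
      ↔ (lst.filter (fun l => get_pos l pos == x)).length = 1 := by
    rw [PySem.Set.mem_ofList, List.mem_filter]
    constructor
    · rintro ⟨-, h⟩
      simpa using h
    · intro h1
      have hne : (lst.filter (fun l => get_pos l pos == x)) ≠ [] := by
        intro hnil; rw [hnil] at h1; simp at h1
      obtain ⟨l, hl⟩ := List.exists_mem_of_ne_nil _ hne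
      rw [List.mem_filter] at hl
      have hmem : x ∈ lst.map (fun l => get_pos l pos) :=
        List.mem_map.mpr ⟨l, hl.1, by simpa using hl.2⟩
      exact ⟨(PySem.Set.mem_ofList _ _).mpr hmem, by simp [h1]⟩
  by_cases h1 : (lst.filter (fun l => get_pos l pos == x)).length = 1
  · simp [hiff, h1]
  · have hb : ((lst.filter (fun l => get_pos l pos == x)).length == 1) = false :=
      beq_eq_false_iff_ne.mpr h1
    simp [hiff, h1, hb]

theorem pv_ofList_append (ys : List String) (y : String) :
    PySem.Set.ofList (ys ++ [y]) = PySem.Set.add (PySem.Set.ofList ys) y := by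
  rw [PySem.Set.ofList_eq_foldl, PySem.Set.ofList_eq_foldl, List.foldl_append]
  rfl

-- the combinatorial heart: emitting the unique member of each singleton group, in
-- first-occurrence order of tokens, is the same list as filtering lst by
-- "my token occurs exactly once" (kept tokens occur once, so the orders agree)
theorem pv_main (f : String → String) (lst : List String) :
    ∀ (Q : String → Bool),
    ((PySem.Set.ofList (lst.map f)).filter
        (fun k => ((lst.filter (fun l => f l == k)).length == 1) && Q k)).map
      (fun k => PySem.List.pyGetD (lst.filter (fun l => f l == k)) 0 "")
    = lst.filter (fun l => ((lst.filter (fun l' => f l' == f l)).length == 1) && Q (f l)) := by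
  induction lst using List.reverseRecOn with
  | nil => intro Q; rfl
  | append_singleton xs x ih =>
    intro Q
    have hg : ∀ k, (xs ++ [x]).filter (fun l => f l == k)
        = xs.filter (fun l => f l == k) ++ if f x == k then [x] else [] := by
      intro k; rw [List.filter_append]; simp [List.filter_singleton]
    by_cases hx : f x ∈ xs.map f
    · -- the token of x already occurs in xs
      have hne : xs.filter (fun l => f l == f x) ≠ [] := by
        rw [List.mem_map] at hx
        obtain ⟨l, hl, hfl⟩ := hx
        exact List.ne_nil_of_mem (List.mem_filter.mpr ⟨hl, by simp [hfl]⟩)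
      have hpos : 1 ≤ (xs.filter (fun l => f l == f x)).length :=
        List.length_pos_of_ne_nil hne
      have hof : PySem.Set.ofList ((xs ++ [x]).map f) = PySem.Set.ofList (xs.map f) := by
        rw [List.map_append, List.map_singleton, pv_ofList_append]
        simp [PySem.Set.add]
        exact List.mem_map.mp hx
      rw [hof]
      have hfilter : (PySem.Set.ofList (xs.map f)).filter
            (fun k => (((xs ++ [x]).filter (fun l => f l == k)).length == 1) && Q k)
          = (PySem.Set.ofList (xs.map f)).filter
            (fun k => ((xs.filter (fun l => f l == k)).length == 1) && (Q k && !(k == f x))) := by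
        apply List.filter_congr
        intro k _
        rw [hg k]
        by_cases hk0 : k = f x
        · subst hk0
          have hlen2 : (xs.filter (fun l => f l == f x) ++ if f x == f x then [x] else []).length
              = (xs.filter (fun l => f l == f x)).length + 1 := by simp
          have h2 : ((xs.filter (fun l => f l == f x) ++ if f x == f x then [x] else []).length == 1) = false := by
            rw [beq_eq_false_iff_ne, hlen2]
            omega
          rw [h2]
          simp
        · have hxk : (f x == k) = false := beq_eq_false_iff_ne.mpr (fun h => hk0 h.symm)
          have hkx : (k == f x) = false := beq_eq_false_iff_ne.mpr hk0
          simp [hxk, hkx]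
      rw [hfilter]
      have hmap : ∀ k ∈ (PySem.Set.ofList (xs.map f)).filter
            (fun k => ((xs.filter (fun l => f l == k)).length == 1) && (Q k && !(k == f x))),
          PySem.List.pyGetD ((xs ++ [x]).filter (fun l => f l == k)) 0 ""
            = PySem.List.pyGetD (xs.filter (fun l => f l == k)) 0 "" := by
        intro k hk
        rw [List.mem_filter] at hk
        have hkx : (k == f x) = false := by
          have h2 := hk.2
          simp only [Bool.and_eq_true, Bool.not_eq_true'] at h2
          exact h2.2.2
        have hxk : (f x == k) = false := by
          rw [beq_eq_false_iff_ne] at hkx ⊢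
          exact fun h => hkx h.symm
        rw [hg k, hxk]
        simp
      rw [List.map_congr_left hmap, ih (fun k => Q k && !(k == f x))]
      rw [List.filter_append]
      have hfx : List.filter
          (fun l => (((xs ++ [x]).filter (fun l' => f l' == f l)).length == 1) && Q (f l)) [x] = [] := by
        have hlen2 : (((xs ++ [x]).filter (fun l' => f l' == f x)).length)
            = (xs.filter (fun l' => f l' == f x)).length + 1 := by
          rw [hg (f x)]
          simp
        have h2 : (((xs ++ [x]).filter (fun l' => f l' == f x)).length == 1) = false := by
          rw [beq_eq_false_iff_ne, hlen2]
          omega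
        rw [List.filter_singleton, h2]
        simp
      rw [hfx, List.append_nil]
      apply List.filter_congr
      intro l hl
      by_cases hlf : f l = f x
      · have hp : 1 ≤ (xs.filter (fun l' => f l' == f l)).length := by
          rw [hlf]; exact hpos
        have hlen2 : (((xs ++ [x]).filter (fun l' => f l' == f l)).length)
            = (xs.filter (fun l' => f l' == f l)).length + 1 := by
          rw [hg (f l)]
          simp [hlf]
        have hlen : (((xs ++ [x]).filter (fun l' => f l' == f l)).length == 1) = false := by
          rw [beq_eq_false_iff_ne, hlen2]
          omega
        have hq1 : (f l == f x) = true := by simp [hlf]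
        rw [hlen, hq1]
        simp
      · have hxl : (f x == f l) = false := beq_eq_false_iff_ne.mpr (fun h => hlf h.symm)
        have hlx : (f l == f x) = false := beq_eq_false_iff_ne.mpr hlf
        rw [hg (f l), hxl]
        simp [hlx]
    · -- the token of x is fresh
      have hgx : xs.filter (fun l => f l == f x) = [] := by
        rw [List.filter_eq_nil_iff]
        intro l hl
        simp only [beq_iff_eq]
        exact fun heq => hx (List.mem_map.mpr ⟨l, hl, heq⟩)
      have hof : PySem.Set.ofList ((xs ++ [x]).map f) = PySem.Set.ofList (xs.map f) ++ [f x] := by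
        rw [List.map_append, List.map_singleton, pv_ofList_append]
        simp [PySem.Set.add]
        intro l hl heq
        exact hx (List.mem_map.mpr ⟨l, hl, heq⟩)
      rw [hof, List.filter_append, List.map_append]
      have hcong1 : (PySem.Set.ofList (xs.map f)).filter
            (fun k => (((xs ++ [x]).filter (fun l => f l == k)).length == 1) && Q k)
          = (PySem.Set.ofList (xs.map f)).filter
            (fun k => ((xs.filter (fun l => f l == k)).length == 1) && Q k) := by
        apply List.filter_congr
        intro k hk
        have hkx : (f x == k) = false := by
          rw [beq_eq_false_iff_ne]
          intro h
          exact hx (by rw [h]; exact (PySem.Set.mem_ofList _ _).mp hk)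
        rw [hg k, hkx]
        simp
      rw [hcong1]
      have hmap1 : ∀ k ∈ (PySem.Set.ofList (xs.map f)).filter
            (fun k => ((xs.filter (fun l => f l == k)).length == 1) && Q k),
          PySem.List.pyGetD ((xs ++ [x]).filter (fun l => f l == k)) 0 ""
            = PySem.List.pyGetD (xs.filter (fun l => f l == k)) 0 "" := by
        intro k hk
        rw [List.mem_filter] at hk
        have hkx : (f x == k) = false := by
          rw [beq_eq_false_iff_ne]
          intro h
          exact hx (by rw [h]; exact (PySem.Set.mem_ofList _ _).mp hk.1)
        rw [hg k, hkx]
        simp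
      rw [List.map_congr_left hmap1, ih Q]
      rw [List.filter_append]
      have hcong2 : xs.filter
            (fun l => (((xs ++ [x]).filter (fun l' => f l' == f l)).length == 1) && Q (f l))
          = xs.filter
            (fun l => ((xs.filter (fun l' => f l' == f l)).length == 1) && Q (f l)) := by
        apply List.filter_congr
        intro l hl
        have hxl : (f x == f l) = false :=
          beq_eq_false_iff_ne.mpr (fun h => hx (List.mem_map.mpr ⟨l, hl, h.symm⟩))
        rw [hg (f l), hxl]
        simp
      rw [hcong2]
      -- remaining: the two singleton tails agree
      cases hQx : Q (f x) <;>
        simp [List.filter_singleton, hgx, hQx, PySem.List.pyGetD_zero_cons]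

theorem uniqe_at_pos_spec : Claim_equal_uniqe_at_pos := by
  intro lst pos _ _
  unfold Spec_uniqe_at_pos
  rw [pv_A_eq, pv_B_eq, pv_grp_items]
  rw [List.filter_map, List.map_map]
  have hB : ((PySem.Set.ofList (lst.map (fun l => get_pos l pos))).filter
        ((fun p => p.2.length == 1 && !(PySem.Set.contains (pvForb lst pos) p.1))
          ∘ (fun k => (k, lst.filter (fun l => get_pos l pos == k))))).map
        ((fun p => PySem.List.pyGetD p.2 0 "")
          ∘ (fun k => (k, lst.filter (fun l => get_pos l pos == k))))
      = ((PySem.Set.ofList (lst.map (fun l => get_pos l pos))).filter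
          (fun k => ((lst.filter (fun l => get_pos l pos == k)).length == 1)
            && !(PySem.Set.contains (pvForb lst pos) k))).map
        (fun k => PySem.List.pyGetD (lst.filter (fun l => get_pos l pos == k)) 0 "") := rfl
  rw [hB, pv_main (fun l => get_pos l pos) lst (fun k => !(PySem.Set.contains (pvForb lst pos) k))]
  apply List.filter_congr
  intro l _
  exact pv_A_pred lst pos (get_pos l pos)
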